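-- pv_equiv track=rewrite | github.com/iwangjian/Plan4RecDial | utils/data_utils.py | match_sentence
-- ===== SOURCE A (Python) =====
-- UNK = "[UNK]"
--
-- ACT = "[A]"       # denote an action
--
-- TPC = "[T]"       # denote a topic
--
-- def fuzzy_str(with_unk, list_sen):
--     string = with_unk.split(UNK)[0]
--     for l in list_sen:
--         if l[:len(string)] == string:
--             return l
--     return with_unk
--
-- def match_sentence(sen, list_sen):
--     return_str = ACT
--     now_is = True
--     sen_split = []
--     for s in sen.split(ACT)[1:]:
--         sen_split.extend(s.split(TPC))
--     for s in sen_split: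
--         if UNK in s:
--             return_str = return_str + fuzzy_str(s, list_sen)
--         else:
--             return_str = return_str + s
--         if now_is:
--             return_str = return_str + TPC
--             now_is = False
--         else:
--             return_str = return_str + ACT
--             now_is = True
--     return return_str[:-3]
-- ===== SOURCE B (Python) =====
-- UNK = "[UNK]"
-- ACT = "[A]"
-- TPC = "[T]"
--
-- def match_sentence(sen, list_sen):
--     pieces = [p for chunk in sen.split(ACT)[1:] for p in chunk.split(TPC)]
--     idx = {}
--     for l in list_sen:
--         for i in range(len(l) + 1):
--             idx.setdefault(l[:i], l)
--     parts = []
--     for i, p in enumerate(pieces):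
--         if UNK in p:
--             parts.append(idx.get(p.split(UNK)[0], p))
--         else:
--             parts.append(p)
--         parts.append(TPC if i % 2 == 0 else ACT)
--     return (ACT + "".join(parts))[:-3]
-- ===== Notes on version B (the rewrite author's own statement) =====
-- stated objective: alternative
-- what changed: Replaces the per-piece linear scan of list_sen (with repeated slicing) by a prefix hash-index built once over list_sen, and replaces the mutable return_str/now_is state machine by a flat comprehension plus an enumerate-indexed parts list joined at the end.
import Mathlib
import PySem

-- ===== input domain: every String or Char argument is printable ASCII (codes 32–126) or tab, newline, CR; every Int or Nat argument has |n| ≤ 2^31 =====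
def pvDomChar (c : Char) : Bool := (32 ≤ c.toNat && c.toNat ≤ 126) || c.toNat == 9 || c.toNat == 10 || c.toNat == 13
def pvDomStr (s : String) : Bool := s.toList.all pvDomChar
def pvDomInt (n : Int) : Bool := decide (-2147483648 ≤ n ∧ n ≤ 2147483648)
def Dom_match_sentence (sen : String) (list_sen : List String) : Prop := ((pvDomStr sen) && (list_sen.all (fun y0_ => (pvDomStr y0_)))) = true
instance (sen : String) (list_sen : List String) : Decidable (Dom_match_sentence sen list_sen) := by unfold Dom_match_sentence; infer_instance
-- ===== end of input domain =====

-- B replaces A's per-piece linear scan of list_sen by a prefix hash-index built once,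
-- and A's mutable return_str/now_is state machine by an enumerate-indexed parts list joined at the end.

-- shared module constants
def pvUNK : List Char := "[UNK]".toList
def pvACT : List Char := "[A]".toList
def pvTPC : List Char := "[T]".toList

-- ===== PORT A =====
-- for l in list_sen: if l[:len(string)] == string: return l;  return with_unk
def fuzzyGo (string : List Char) (with_unk : List Char) : List (List Char) → List Char
  | [] => with_unk
  | l :: ls =>
    if PySem.List.slice l none (some (string.length : Int)) = string then l
    else fuzzyGo string with_unk ls

def fuzzy_str (with_unk : List Char) (list_sen : List (List Char)) : List Char :=
  let string := (PySem.Chars.splitOn with_unk pvUNK).headD []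
  fuzzyGo string with_unk list_sen

def match_sentence (sen : String) (list_sen : List String) : String :=
  let lsen := list_sen.map String.toList
  let sen_split :=
    ((PySem.Chars.splitOn sen.toList pvACT).drop 1).foldl
      (fun acc s => acc ++ PySem.Chars.splitOn s pvTPC) []
  let st := sen_split.foldl
    (fun (st : List Char × Bool) s =>
      let r := if PySem.Chars.isIn pvUNK s then st.1 ++ fuzzy_str s lsen else st.1 ++ s
      if st.2 then (r ++ pvTPC, false) else (r ++ pvACT, true))
    (pvACT, true)
  String.ofList (PySem.List.slice st.1 none (some (-3)))

-- ===== PORT B =====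
-- idx = {}; for l in list_sen: for i in range(len(l)+1): idx.setdefault(l[:i], l)
def buildIdx (list_sen : List (List Char)) : PySem.Dict (List Char) (List Char) :=
  list_sen.foldl
    (fun d l =>
      (PySem.List.pyRange 0 ((l.length : Int) + 1) 1).foldl
        (fun d i => d.setdefault (PySem.List.slice l none (some i)) l) d)
    PySem.Dict.empty

-- idx.get(p.split(UNK)[0], p) if UNK in p else p
def lookupPiece (idx : PySem.Dict (List Char) (List Char)) (p : List Char) : List Char :=
  if PySem.Chars.isIn pvUNK p then idx.getD ((PySem.Chars.splitOn p pvUNK).headD []) p else p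

def match_sentence_alt (sen : String) (list_sen : List String) : String :=
  let pieces :=
    ((PySem.Chars.splitOn sen.toList pvACT).drop 1).flatMap
      (fun chunk => PySem.Chars.splitOn chunk pvTPC)
  let idx := buildIdx (list_sen.map String.toList)
  let parts := (PySem.List.enumerate pieces).foldl
    (fun acc ip =>
      acc ++ [lookupPiece idx ip.2, if PySem.Int.mod ip.1 2 == 0 then pvTPC else pvACT]) []
  String.ofList (PySem.List.slice (pvACT ++ PySem.Chars.join [] parts) none (some (-3)))

-- ===== PRECONDITION & SPEC =====
def Spec_match_sentence (sen : String) (list_sen : List String) (out : String) : Prop := out = match_sentence_alt sen list_sen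
instance (sen : String) (list_sen : List String) (out : String) : Decidable (Spec_match_sentence sen list_sen out) := by unfold Spec_match_sentence; infer_instance

-- ===== CLAIM (what is proved, stated in full; the proofs are below) =====
def Claim_equal_match_sentence : Prop := ∀ (sen : String) (list_sen : List String), Dom_match_sentence sen list_sen → Spec_match_sentence sen list_sen (match_sentence sen list_sen)

-- ===== LEMMAS AND PROOFS =====

theorem pvSliceTake (l : List Char) (n : Nat) :
    PySem.List.slice l none (some (n : Int)) = l.take n := by
  simp [PySem.List.slice_to]

-- the common "rendered pieces with alternating separators" shape both loops produce
def pvRep (lsen : List (List Char)) : List (List Char) → Bool → List Char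
  | [], _ => []
  | p :: ps, b =>
    (if PySem.Chars.isIn pvUNK p then fuzzy_str p lsen else p)
      ++ (if b then pvTPC else pvACT) ++ pvRep lsen ps (!b)

-- A's fuzzy scan is the first prefix match
theorem fuzzyGo_eq_find (string with_unk : List Char) (ls : List (List Char)) :
    fuzzyGo string with_unk ls = ((ls.find? (fun l => string <+: l)).getD with_unk) := by
  induction ls with
  | nil => rfl
  | cons l ls ih =>
    rw [show fuzzyGo string with_unk (l :: ls)
        = if PySem.List.slice l none (some (string.length : Int)) = string then l
          else fuzzyGo string with_unk ls from rfl, pvSliceTake]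
    by_cases h : string <+: l
    · rw [if_pos (List.prefix_iff_eq_take.mp h).symm,
        List.find?_cons_of_pos (p := fun l => decide (string <+: l)) (by simpa using h)]
      rfl
    · have hne : l.take string.length ≠ string := by
        intro he
        by_cases hle : string.length ≤ l.length
        · exact h (List.prefix_iff_eq_take.mpr he.symm)
        · have : (l.take string.length).length = l.length := by
            rw [List.length_take]; omega
          rw [he] at this; omega
      simp [List.find?, hne, ih, h]

-- inner setdefault loop over all prefixes of l
theorem get?_innerLoop (d : PySem.Dict (List Char) (List Char)) (l q : List Char) (n : Nat)
    (hn : n ≤ l.length + 1) :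
    ((List.map (fun k : Nat => (k : Int)) (List.range n)).foldl
        (fun d i => d.setdefault (PySem.List.slice l none (some i)) l) d).get? q =
      (d.get? q).or (if q <+: l ∧ q.length < n then some l else none) := by
  induction n with
  | zero => simp
  | succ n ih =>
    rw [List.range_succ]
    simp only [List.map_append, List.foldl_append, List.map_cons, List.map_nil, List.foldl_cons,
      List.foldl_nil]
    rw [pvSliceTake]
    by_cases hq : q = l.take n
    · subst hq
      have hpre : l.take n <+: l := List.take_prefix n l
      have hlen : (l.take n).length = n := by
        rw [List.length_take]; omega
      rw [PySem.Dict.get?_setdefault_self, ih (by omega)]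
      cases h : d.get? (l.take n) with
      | some v => simp [hpre, hlen]
      | none => simp [hpre, hlen]
    · rw [PySem.Dict.get?_setdefault_of_ne _ _ hq, ih (by omega)]
      cases h : d.get? q with
      | some v => simp
      | none =>
        simp only [Option.none_or]
        by_cases hpre : q <+: l
        · have hne : q.length ≠ n := by
            intro he
            exact hq (he ▸ List.prefix_iff_eq_take.mp hpre)
          by_cases h1 : q.length < n <;> simp [hpre, h1] <;> omega
        · simp [hpre]

-- the whole index build: lookup finds the first sentence with q as a prefix
theorem get?_buildIdx_aux (lsen : List (List Char)) (d : PySem.Dict (List Char) (List Char))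
    (q : List Char) :
    (lsen.foldl
      (fun d l =>
        (PySem.List.pyRange 0 ((l.length : Int) + 1) 1).foldl
          (fun d i => d.setdefault (PySem.List.slice l none (some i)) l) d) d).get? q =
      (d.get? q).or (lsen.find? (fun l => q <+: l)) := by
  induction lsen generalizing d with
  | nil => simp
  | cons l ls ih =>
    simp only [List.foldl_cons]
    rw [ih]
    have hc : ((l.length : Int) + 1) = ((l.length + 1 : Nat) : Int) := by push_cast; ring
    rw [hc, PySem.List.pyRange_zero_natCast, get?_innerLoop d l q (l.length + 1) (le_refl _)]
    by_cases hpre : q <+: l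
    · have hlen : q.length < l.length + 1 := by
        have := hpre.length_le; omega
      simp [List.find?, hpre, hlen]
    · simp [List.find?, hpre]

theorem getD_buildIdx (lsen : List (List Char)) (q p : List Char) :
    (buildIdx lsen).getD q p = ((lsen.find? (fun l => q <+: l)).getD p) := by
  rw [PySem.Dict.getD_eq_get?_getD, buildIdx, get?_buildIdx_aux]
  simp [PySem.Dict.empty, PySem.Dict.get?]

-- B's lookup equals A's fuzzy replacement, piecewise
theorem lookupPiece_eq (lsen : List (List Char)) (p : List Char) :
    lookupPiece (buildIdx lsen) p =
      (if PySem.Chars.isIn pvUNK p then fuzzy_str p lsen else p) := by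
  unfold lookupPiece fuzzy_str
  rw [getD_buildIdx, fuzzyGo_eq_find]

theorem pvJoinNil (parts : List (List Char)) : PySem.Chars.join [] parts = parts.flatten := by
  induction parts with
  | nil => simp [PySem.Chars.join_nil]
  | cons p ps ih => cases ps <;> simp_all [PySem.Chars.join_singleton, PySem.Chars.join_cons_cons]

-- A's state-machine loop produces pvRep
theorem foldA_eq_rep (lsen : List (List Char)) (pieces : List (List Char)) (r : List Char)
    (b : Bool) :
    (pieces.foldl
      (fun (st : List Char × Bool) s =>
        let r := if PySem.Chars.isIn pvUNK s then st.1 ++ fuzzy_str s lsen else st.1 ++ s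
        if st.2 then (r ++ pvTPC, false) else (r ++ pvACT, true)) (r, b)).1 =
      r ++ pvRep lsen pieces b := by
  induction pieces generalizing r b with
  | nil => simp [pvRep]
  | cons p ps ih =>
    cases b <;> by_cases h : PySem.Chars.isIn pvUNK p <;>
      simp [pvRep, h, ih, List.append_assoc]

theorem pvParity (k : Int) :
    (PySem.Int.mod (k + 1) 2 == 0) = !(PySem.Int.mod k 2 == 0) := by
  simp only [PySem.Int.mod_eq_emod_of_pos (show (0:Int) < 2 by norm_num)]
  rcases Int.emod_two_eq k with h | h
  · have h2 : (k + 1) % 2 = 1 := by omega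
    simp [h, h2]
  · have h2 : (k + 1) % 2 = 0 := by omega
    simp [h, h2]

-- B's enumerate loop produces pvRep
theorem foldB_eq_rep (lsen : List (List Char)) (pieces : List (List Char)) (k : Int)
    (hk : 0 ≤ k) (acc : List (List Char)) :
    PySem.Chars.join [] ((PySem.List.enumerate pieces k).foldl
      (fun acc ip =>
        acc ++ [lookupPiece (buildIdx lsen) ip.2,
          if PySem.Int.mod ip.1 2 == 0 then pvTPC else pvACT]) acc) =
      PySem.Chars.join [] acc ++ pvRep lsen pieces (PySem.Int.mod k 2 == 0) := by
  induction pieces generalizing k acc with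
  | nil => simp [PySem.List.enumerate, pvRep]
  | cons p ps ih =>
    rw [PySem.List.enumerate_cons]
    simp only [List.foldl_cons]
    rw [ih (k + 1) (by omega), pvParity k, lookupPiece_eq]
    simp [pvJoinNil, pvRep, List.append_assoc]

-- ===== VERDICT (by name: the statement is the Claim_ definition above) =====
theorem match_sentence_spec : Claim_equal_match_sentence := by
  intro sen list_sen _
  unfold Spec_match_sentence match_sentence match_sentence_alt
  dsimp only
  rw [PySem.List.foldl_append_eq_flatMap, foldA_eq_rep,
    show PySem.List.enumerate ((((PySem.Chars.splitOn sen.toList pvACT).drop 1).flatMap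
      (fun chunk => PySem.Chars.splitOn chunk pvTPC))) = PySem.List.enumerate
      ((((PySem.Chars.splitOn sen.toList pvACT).drop 1).flatMap
      (fun chunk => PySem.Chars.splitOn chunk pvTPC))) 0 from rfl,
    foldB_eq_rep _ _ 0 (le_refl 0)]
  simp [PySem.Chars.join_nil]
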